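-- pv_equiv track=rewrite | github.com/NTNUNSL/Fish-Motion-Tracking | Functions.py | fishid_union
-- ===== SOURCE A (Python) =====
-- def fishid_union( unionfishid_list):
--     unionlist = []
--     for i in range( 0, len(unionfishid_list), 1):
--         fish_ids    = unionfishid_list[i][0]
--         nextcnt_ids = unionfishid_list[i][1]
--
--         cont     = 0
--         new_list = [[],[]]
--         for j in range( 0, len(unionlist), 1):
--             unionlist_detail = unionlist[j-cont]
--
--             bool_in = set(nextcnt_ids) & set(unionlist_detail[1])
--             if bool_in:
--                 new_list[0] = new_list[0] + unionlist_detail[0]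
--                 new_list[1] = new_list[1] + unionlist_detail[1]
--                 unionlist.remove(unionlist_detail)
--                 cont = cont + 1
--         new_list[0] = new_list[0] + fish_ids
--         new_list[1] = new_list[1] + nextcnt_ids
--         unionlist.append(new_list)
--
--     for i in range( 0, len(unionlist), 1):
--         unionlist[i][0] = list(set(unionlist[i][0]))
--         unionlist[i][1] = list(set(unionlist[i][1]))
--
--         unionlist[i][0].sort()
--         unionlist[i][1].sort()
--
--     return unionlist
-- ===== SOURCE B (Python) =====
-- def fishid_union(unionfishid_list):
--     owner = {}   # nextcnt id -> key of the component currently holding it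
--     comps = {}   # key -> (fish_ids, nextcnt_ids), in insertion order
--     ctr = 0
--     for item in unionfishid_list:
--         fish = item[0]
--         nxt = item[1]
--         hit = set()
--         for x in nxt:
--             if x in owner:
--                 hit.add(owner[x])
--         mfish = []
--         mnxt = []
--         for k in list(comps):
--             if k in hit:
--                 c = comps[k]
--                 mfish = mfish + c[0]
--                 mnxt = mnxt + c[1]
--                 del comps[k]
--         comps[ctr] = (mfish + fish, mnxt + nxt)
--         for x in comps[ctr][1]:
--             owner[x] = ctr
--         ctr += 1
--     return [[sorted(set(f)), sorted(set(nx))] for (f, nx) in comps.values()]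
-- ===== Notes on version B (the rewrite author's own statement) =====
-- stated objective: alternative
-- what changed: B replaces A's per-item rescan of every accumulated group (building a Python set of each group's nextcnt ids and intersecting with the new item's ids) by a dict mapping each nextcnt id to the key of the component currently holding it, so the components to merge are identified by direct id lookups; components live in a key-indexed insertion-ordered dict instead of a list mutated in place with remove() and an index-shift counter.
import Mathlib
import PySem

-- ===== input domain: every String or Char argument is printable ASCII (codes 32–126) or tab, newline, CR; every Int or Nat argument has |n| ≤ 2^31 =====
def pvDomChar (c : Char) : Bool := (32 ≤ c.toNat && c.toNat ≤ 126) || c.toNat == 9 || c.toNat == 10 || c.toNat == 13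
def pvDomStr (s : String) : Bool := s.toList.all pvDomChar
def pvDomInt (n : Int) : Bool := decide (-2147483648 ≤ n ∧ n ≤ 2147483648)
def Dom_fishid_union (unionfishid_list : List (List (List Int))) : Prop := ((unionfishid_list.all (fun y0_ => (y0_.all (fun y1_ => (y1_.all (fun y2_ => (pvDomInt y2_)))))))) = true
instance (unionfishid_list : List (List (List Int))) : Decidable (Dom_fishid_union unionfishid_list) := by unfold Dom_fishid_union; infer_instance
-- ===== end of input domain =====

-- B replaces A's per-item set intersections against every accumulated group by a dict
-- mapping each nextcnt id to its current component key, with components held in a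
-- key-indexed insertion-ordered dict; objective: alternative algorithm (not measured faster).

-- ===== PORT A =====
def pvInterNE (nxt : List Int) (c : List Int) : Bool :=
  decide (PySem.Set.inter (PySem.Set.ofList nxt) c ≠ [])

def pvABody (nxt : List Int) (st : List (List Int × List Int) × Int × List Int × List Int)
    (j : Int) : List (List Int × List Int) × Int × List Int × List Int :=
  let detail := PySem.List.pyGetD st.1 (j - st.2.1) ([], [])
  if pvInterNE nxt detail.2 then
    ((PySem.List.remove? st.1 detail).getD st.1, st.2.1 + 1,
     st.2.2.1 ++ detail.1, st.2.2.2 ++ detail.2)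
  else st

def pvAStep (unionlist : List (List Int × List Int)) (item : List (List Int)) :
    List (List Int × List Int) :=
  let fish_ids := PySem.List.pyGetD item 0 []
  let nextcnt_ids := PySem.List.pyGetD item 1 []
  let st := (PySem.List.pyRange 0 (unionlist.length : Int) 1).foldl
    (pvABody nextcnt_ids) (unionlist, 0, [], [])
  st.1 ++ [(st.2.2.1 ++ fish_ids, st.2.2.2 ++ nextcnt_ids)]

def fishid_union (unionfishid_list : List (List (List Int))) : List (List (List Int)) :=
  let unionlist := (PySem.List.pyRange 0 (unionfishid_list.length : Int) 1).foldl
    (fun acc i => pvAStep acc (PySem.List.pyGetD unionfishid_list i [])) []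
  unionlist.map (fun c =>
    [PySem.List.sorted (PySem.Set.ofList c.1) (fun x => x) false,
     PySem.List.sorted (PySem.Set.ofList c.2) (fun x => x) false])

-- ===== PORT B =====
def pvHitFold (owner : PySem.Dict Int Int) (nxt : List Int) : PySem.Set Int :=
  nxt.foldl (fun h x => match owner.get? x with
    | some k => PySem.Set.add h k
    | none => h) PySem.Set.empty

def pvBScanBody (hit : PySem.Set Int)
    (ms : PySem.Dict Int (List Int × List Int) × List Int × List Int) (k : Int) :
    PySem.Dict Int (List Int × List Int) × List Int × List Int :=
  if PySem.Set.contains hit k then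
    let c := (ms.1.get? k).getD ([], [])
    (ms.1.erase k, ms.2.1 ++ c.1, ms.2.2 ++ c.2)
  else ms

def pvAltStep (st : PySem.Dict Int Int × PySem.Dict Int (List Int × List Int) × Int)
    (item : List (List Int)) :
    PySem.Dict Int Int × PySem.Dict Int (List Int × List Int) × Int :=
  let fish := PySem.List.pyGetD item 0 []
  let nxt := PySem.List.pyGetD item 1 []
  let hit := pvHitFold st.1 nxt
  let ms := st.2.1.keys.foldl (pvBScanBody hit) (st.2.1, [], [])
  let comps' := ms.1.insert st.2.2 (ms.2.1 ++ fish, ms.2.2 ++ nxt)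
  let owner' := (ms.2.2 ++ nxt).foldl (fun o x => o.insert x st.2.2) st.1
  (owner', comps', st.2.2 + 1)

def fishid_union_alt (unionfishid_list : List (List (List Int))) : List (List (List Int)) :=
  let st := unionfishid_list.foldl pvAltStep (PySem.Dict.empty, PySem.Dict.empty, 0)
  st.2.1.values.map (fun c =>
    [PySem.List.sorted (PySem.Set.ofList c.1) (fun x => x) false,
     PySem.List.sorted (PySem.Set.ofList c.2) (fun x => x) false])

-- ===== PRECONDITION & SPEC =====
-- Pre_ excludes inputs containing an inner list of length < 2, on which the Python A raises
-- IndexError at unionfishid_list[i][1] (or [i][0]).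
def Pre_fishid_union (unionfishid_list : List (List (List Int))) : Prop :=
  ∀ item ∈ unionfishid_list, 2 ≤ item.length
instance (unionfishid_list : List (List (List Int))) : Decidable (Pre_fishid_union unionfishid_list) := by unfold Pre_fishid_union; infer_instance

def pvWitness_fishid_union : List (List (List Int)) := [[[1], [5]], [[2], [5, 6]], [[3], [7]]]

def Spec_fishid_union (unionfishid_list : List (List (List Int))) (out : List (List (List Int))) : Prop := out = fishid_union_alt unionfishid_list
instance (unionfishid_list : List (List (List Int))) (out : List (List (List Int))) : Decidable (Spec_fishid_union unionfishid_list out) := by unfold Spec_fishid_union; infer_instance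

-- ===== CLAIM (what is proved, stated in full; the proofs are below) =====
def Claim_equal_fishid_union : Prop := ∀ (unionfishid_list : List (List (List Int))), Dom_fishid_union unionfishid_list → Pre_fishid_union unionfishid_list → Spec_fishid_union unionfishid_list (fishid_union unionfishid_list)

-- ===== LEMMAS AND PROOFS =====
theorem pvInterNE_iff (nxt c : List Int) :
    pvInterNE nxt c = true ↔ ∃ x ∈ nxt, x ∈ c := by
  simp only [pvInterNE, decide_eq_true_eq, ne_eq]
  rw [List.eq_nil_iff_forall_not_mem]
  push Not
  constructor
  · rintro ⟨x, hx⟩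
    simp only [PySem.Set.inter, List.mem_filter, PySem.Set.mem_ofList, PySem.Set.contains] at hx
    exact ⟨x, hx.1, by simpa using hx.2⟩
  · rintro ⟨x, hx1, hx2⟩
    exact ⟨x, by simp [PySem.Set.inter, List.mem_filter, PySem.Set.mem_ofList, PySem.Set.contains, hx1, hx2]⟩

theorem pvGetD_append_len {α : Type} (keep : List α) (p : α) (rest : List α) (d : α) :
    (keep ++ p :: rest).getD keep.length d = p := by
  simp [List.getD]

theorem pvRemove_append {α : Type} [BEq α] [LawfulBEq α]
    (keep : List α) (p : α) (rest : List α) (hp : p ∉ keep) :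
    PySem.List.remove? (keep ++ p :: rest) p = some (keep ++ rest) := by
  rw [PySem.List.remove?_eq_some_erase _ p (by simp)]
  rw [List.erase_append_right _ hp]
  simp

theorem pvInnerA (nxt : List Int) :
    ∀ (pending keep : List (List Int × List Int)) (cont : Int) (a0 a1 : List Int),
    (∀ c ∈ keep, pvInterNE nxt c.2 = false) →
    (PySem.List.pyRange (cont + keep.length) (cont + keep.length + pending.length) 1).foldl
      (pvABody nxt) (keep ++ pending, cont, a0, a1)
    = (keep ++ pending.filter (fun c => !pvInterNE nxt c.2),
       cont + (pending.countP (fun c => pvInterNE nxt c.2) : Int),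
       a0 ++ ((pending.filter (fun c => pvInterNE nxt c.2)).map (·.1)).flatten,
       a1 ++ ((pending.filter (fun c => pvInterNE nxt c.2)).map (·.2)).flatten) := by
  intro pending
  induction pending with
  | nil =>
    intro keep cont a0 a1 hkeep
    rw [PySem.List.pyRange_one_eq_nil (by simp)]
    simp
  | cons p rest ih =>
    intro keep cont a0 a1 hkeep
    rw [PySem.List.pyRange_one_cons (by simp only [List.length_cons]; push_cast; omega)]
    rw [List.foldl_cons]
    have hidx : cont + (keep.length : Int) - cont = (keep.length : Int) := by omega
    have hdetail : PySem.List.pyGetD (keep ++ p :: rest) (cont + ↑keep.length - cont) ([], []) = p := by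
      rw [hidx, PySem.List.pyGetD_natCast, pvGetD_append_len]
    by_cases hp : pvInterNE nxt p.2 = true
    · have hnotmem : p ∉ keep := fun hm => by simp [hkeep p hm] at hp
      have hstep : pvABody nxt (keep ++ p :: rest, cont, a0, a1) (cont + ↑keep.length)
          = (keep ++ rest, cont + 1, a0 ++ p.1, a1 ++ p.2) := by
        simp only [pvABody, hdetail, hp, if_true, pvRemove_append keep p rest hnotmem,
          Option.getD_some]
      rw [hstep]
      have h1 : cont + ↑keep.length + 1 = (cont + 1) + (keep.length : Int) := by omega
      have h2 : cont + ↑keep.length + ((p :: rest).length : Int)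
          = (cont + 1) + ↑keep.length + ↑rest.length := by
        simp only [List.length_cons]; push_cast; omega
      rw [h1, h2, ih keep (cont + 1) (a0 ++ p.1) (a1 ++ p.2) hkeep]
      simp [List.filter_cons, List.countP_cons, hp, List.append_assoc, Prod.ext_iff]
      all_goals omega
    · have hstep : pvABody nxt (keep ++ p :: rest, cont, a0, a1) (cont + ↑keep.length)
          = (keep ++ p :: rest, cont, a0, a1) := by
        simp only [pvABody, hdetail, hp, if_false, Bool.false_eq_true]
      rw [hstep]
      have h1 : cont + ↑keep.length + 1 = cont + ((keep ++ [p]).length : Int) := by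
        simp; push_cast; omega
      have h2 : cont + ↑keep.length + ((p :: rest).length : Int)
          = cont + ↑(keep ++ [p]).length + ↑rest.length := by
        simp; push_cast; omega
      have hkeep' : ∀ c ∈ keep ++ [p], pvInterNE nxt c.2 = false := by
        intro c hc
        rcases List.mem_append.1 hc with h | h
        · exact hkeep c h
        · simp at h; subst h; simpa using hp
      rw [h1, h2, show keep ++ p :: rest = (keep ++ [p]) ++ rest by simp,
        ih (keep ++ [p]) cont a0 a1 hkeep']
      simp [List.filter_cons, List.countP_cons, hp, List.append_assoc]

def pvMergeStep (L : List (List Int × List Int)) (fish nxt : List Int) :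
    List (List Int × List Int) :=
  L.filter (fun c => !pvInterNE nxt c.2) ++
    [(((L.filter (fun c => pvInterNE nxt c.2)).map (·.1)).flatten ++ fish,
      ((L.filter (fun c => pvInterNE nxt c.2)).map (·.2)).flatten ++ nxt)]

def pvCanon (ul : List (List (List Int))) : List (List Int × List Int) :=
  ul.foldl (fun L item =>
    pvMergeStep L (PySem.List.pyGetD item 0 []) (PySem.List.pyGetD item 1 [])) []

theorem pvAStep_eq (L : List (List Int × List Int)) (item : List (List Int)) :
    pvAStep L item = pvMergeStep L (PySem.List.pyGetD item 0 []) (PySem.List.pyGetD item 1 []) := by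
  have h := pvInnerA (PySem.List.pyGetD item 1 []) L [] 0 [] [] (by simp)
  simp only [List.length_nil, Nat.cast_zero, add_zero, List.nil_append, zero_add] at h
  show (List.foldl (pvABody (PySem.List.pyGetD item 1 [])) (L, 0, ([]:List Int), ([]:List Int)) (PySem.List.pyRange 0 (L.length:Int) 1)).1 ++ [((List.foldl (pvABody (PySem.List.pyGetD item 1 [])) (L, 0, [], []) (PySem.List.pyRange 0 (L.length:Int) 1)).2.2.1 ++ PySem.List.pyGetD item 0 [], (List.foldl (pvABody (PySem.List.pyGetD item 1 [])) (L, 0, [], []) (PySem.List.pyRange 0 (L.length:Int) 1)).2.2.2 ++ PySem.List.pyGetD item 1 [])] = _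
  rw [h]
  simp [pvMergeStep]

theorem pvA_eq_canon (ul : List (List (List Int))) :
    fishid_union ul = (pvCanon ul).map (fun c =>
      [PySem.List.sorted (PySem.Set.ofList c.1) (fun x => x) false,
       PySem.List.sorted (PySem.Set.ofList c.2) (fun x => x) false]) := by
  unfold fishid_union pvCanon
  rw [PySem.List.foldl_pyRange_zero_pyGetD' ul [] pvAStep []]
  have hfun : pvAStep = fun L item => pvMergeStep L (PySem.List.pyGetD item 0 []) (PySem.List.pyGetD item 1 []) := by
    funext L item
    exact pvAStep_eq L item
  rw [hfun]

theorem pvSetContains_iff (s : PySem.Set Int) (k : Int) :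
    PySem.Set.contains s k = true ↔ k ∈ s := by
  simp [PySem.Set.contains]

theorem pvMemAdd (s : PySem.Set Int) (x k : Int) :
    k ∈ PySem.Set.add s x ↔ k ∈ s ∨ k = x := by
  unfold PySem.Set.add
  split_ifs with h
  · constructor
    · exact fun hm => Or.inl hm
    · rintro (hm | rfl)
      · exact hm
      · simpa [PySem.Set.contains] using h
  · simp

theorem pvHitFold_mem (owner : PySem.Dict Int Int) :
    ∀ (l : List Int) (h0 : PySem.Set Int) (k : Int),
    k ∈ l.foldl (fun h x => match owner.get? x with
        | some k' => PySem.Set.add h k'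
        | none => h) h0 ↔ k ∈ h0 ∨ ∃ x ∈ l, owner.get? x = some k := by
  intro l
  induction l with
  | nil => intro h0 k; simp
  | cons x rest ih =>
    intro h0 k
    rw [List.foldl_cons]
    rcases hx : owner.get? x with _ | k'
    · rw [ih]
      constructor
      · rintro (hm | ⟨y, hy, hyk⟩)
        · exact Or.inl hm
        · exact Or.inr ⟨y, List.mem_cons_of_mem _ hy, hyk⟩
      · rintro (hm | ⟨y, hy, hyk⟩)
        · exact Or.inl hm
        · rcases List.mem_cons.1 hy with rfl | hy
          · rw [hx] at hyk; cases hyk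
          · exact Or.inr ⟨y, hy, hyk⟩
    · rw [ih]
      constructor
      · rintro (hm | ⟨y, hy, hyk⟩)
        · rcases (pvMemAdd h0 k' k).1 hm with hm | rfl
          · exact Or.inl hm
          · exact Or.inr ⟨x, List.mem_cons_self .., hx⟩
        · exact Or.inr ⟨y, List.mem_cons_of_mem _ hy, hyk⟩
      · rintro (hm | ⟨y, hy, hyk⟩)
        · exact Or.inl ((pvMemAdd h0 k' k).2 (Or.inl hm))
        · rcases List.mem_cons.1 hy with rfl | hy
          · rw [hx] at hyk
            exact Or.inl ((pvMemAdd h0 k' k).2 (Or.inr (by injection hyk; omega)))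
          · exact Or.inr ⟨y, hy, hyk⟩

theorem pvGetSplit (d : PySem.Dict Int (List Int × List Int)) (pre rest : List (Int × (List Int × List Int)))
    (k : Int) (c : List Int × List Int)
    (hitems : d.items = pre ++ (k, c) :: rest) (hk : k ∉ pre.map (·.1)) :
    d.get? k = some c := by
  unfold PySem.Dict.get?
  rw [hitems, List.find?_append]
  have h1 : pre.find? (fun p => p.1 == k) = none := by
    rw [List.find?_eq_none]
    intro p hp
    simp only [beq_iff_eq]
    intro hpk
    exact hk (by simpa [hpk] using List.mem_map_of_mem (f := (·.1)) hp)
  rw [h1]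
  simp

theorem pvEraseSplit (d : PySem.Dict Int (List Int × List Int)) (pre rest : List (Int × (List Int × List Int)))
    (k : Int) (c : List Int × List Int)
    (hitems : d.items = pre ++ (k, c) :: rest) (hk : k ∉ pre.map (·.1))
    (hkr : k ∉ rest.map (·.1)) :
    (d.erase k).items = pre ++ rest := by
  unfold PySem.Dict.erase
  rw [hitems]
  show (pre ++ (k, c) :: rest).filter (fun p => !p.1 == k) = pre ++ rest
  rw [List.filter_append, List.filter_cons]
  have h1 : pre.filter (fun p => !p.1 == k) = pre := by
    rw [List.filter_eq_self]
    intro p hp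
    simp only [Bool.not_eq_eq_eq_not, Bool.not_true, beq_eq_false_iff_ne, ne_eq]
    intro hpk
    exact hk (by simpa [hpk] using List.mem_map_of_mem (f := (·.1)) hp)
  have h2 : rest.filter (fun p => !p.1 == k) = rest := by
    rw [List.filter_eq_self]
    intro p hp
    simp only [Bool.not_eq_eq_eq_not, Bool.not_true, beq_eq_false_iff_ne, ne_eq]
    intro hpk
    exact hkr (by simpa [hpk] using List.mem_map_of_mem (f := (·.1)) hp)
  simp [h1, h2]

theorem pvGetFoldlInsertConst (v : Int) :
    ∀ (l : List Int) (o : PySem.Dict Int Int) (y : Int),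
    (l.foldl (fun o x => o.insert x v) o).get? y = if y ∈ l then some v else o.get? y := by
  intro l
  induction l with
  | nil => intro o y; simp
  | cons x rest ih =>
    intro o y
    rw [List.foldl_cons, ih]
    by_cases hy : y ∈ rest
    · simp [hy]
    · by_cases hyx : y = x
      · subst hyx
        simp [hy, PySem.Dict.get?_insert_self]
      · simp [hy, hyx, PySem.Dict.get?_insert]

theorem pvScanB (hit : PySem.Set Int) :
    ∀ (suffix pre : List (Int × (List Int × List Int))) (d : PySem.Dict Int (List Int × List Int))
      (a0 a1 : List Int),
    d.items = pre ++ suffix →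
    ((pre ++ suffix).map (·.1)).Nodup →
    (∀ p ∈ pre, PySem.Set.contains hit p.1 = false) →
    (suffix.map (·.1)).foldl (pvBScanBody hit) (d, a0, a1)
    = (PySem.Dict.mk (pre ++ suffix.filter (fun p => !PySem.Set.contains hit p.1)),
       a0 ++ ((suffix.filter (fun p => PySem.Set.contains hit p.1)).map (·.2.1)).flatten,
       a1 ++ ((suffix.filter (fun p => PySem.Set.contains hit p.1)).map (·.2.2)).flatten) := by
  intro suffix
  induction suffix with
  | nil =>
    intro pre d a0 a1 hitems hnd hpre
    have hd : d = PySem.Dict.mk (pre ++ []) := PySem.Dict.ext (by simpa using hitems)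
    rw [hd]
    simp
  | cons p rest ih =>
    intro pre d a0 a1 hitems hnd hpre
    rcases p with ⟨k, c⟩
    have hmap : (pre.map (·.1) ++ k :: rest.map (·.1)).Nodup := by simpa using hnd
    rcases List.nodup_append.1 hmap with ⟨hnd1, hnd2, hdisj⟩
    have hkpre : k ∉ pre.map (·.1) := fun hm => hdisj k hm k (List.mem_cons_self ..) rfl
    have hkrest : k ∉ rest.map (·.1) := by
      intro hm
      exact (List.nodup_cons.1 hnd2).1 hm
    rw [List.map_cons, List.foldl_cons]
    have hget : d.get? k = some c := pvGetSplit d pre rest k c hitems hkpre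
    have hstep : pvBScanBody hit (d, a0, a1) k
        = if PySem.Set.contains hit k then
            (d.erase k, a0 ++ ((d.get? k).getD ([], [])).1, a1 ++ ((d.get? k).getD ([], [])).2)
          else (d, a0, a1) := rfl
    by_cases hk : PySem.Set.contains hit k = true
    · have hkm : k ∈ hit := (pvSetContains_iff hit k).1 hk
      rw [hstep, if_pos hk, hget, Option.getD_some]
      have herase : (d.erase k).items = pre ++ rest := pvEraseSplit d pre rest k c hitems hkpre hkrest
      have hnd' : ((pre ++ rest).map (·.1)).Nodup := by
        simp only [List.map_append, List.nodup_append]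
        exact ⟨hnd1, (List.nodup_cons.1 hnd2).2, fun a ha b hb => hdisj a ha b (List.mem_cons_of_mem _ hb)⟩
      rw [ih pre (d.erase k) (a0 ++ c.1) (a1 ++ c.2) herase hnd' hpre]
      simp [List.filter_cons, hk, hkm, List.append_assoc]
    · have hkm : ¬ (k ∈ hit) := fun hm => hk ((pvSetContains_iff hit k).2 hm)
      rw [hstep, if_neg hk]
      have hpre' : ∀ p ∈ pre ++ [(k, c)], PySem.Set.contains hit p.1 = false := by
        intro p hp
        rcases List.mem_append.1 hp with hp | hp
        · exact hpre p hp
        · simp at hp; subst hp; simpa using hk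
      have hitems' : d.items = (pre ++ [(k, c)]) ++ rest := by simpa [List.append_assoc] using hitems
      have hnd'' : (((pre ++ [(k, c)]) ++ rest).map (·.1)).Nodup := by
        simpa [List.append_assoc] using hnd
      rw [ih (pre ++ [(k, c)]) d a0 a1 hitems' hnd'' hpre']
      simp [List.filter_cons, hk, hkm, List.append_assoc]

def pvInv (L : List (List Int × List Int))
    (st : PySem.Dict Int Int × PySem.Dict Int (List Int × List Int) × Int) : Prop :=
  st.2.1.items.map (·.2) = L ∧
  st.2.1.keys.Nodup ∧
  (∀ k ∈ st.2.1.keys, k < st.2.2) ∧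
  (∀ x k, st.1.get? x = some k ↔ ∃ c, (k, c) ∈ st.2.1.items ∧ x ∈ c.2)

theorem pvInv_step (L : List (List Int × List Int))
    (st : PySem.Dict Int Int × PySem.Dict Int (List Int × List Int) × Int)
    (item : List (List Int)) (h : pvInv L st) :
    pvInv (pvMergeStep L (PySem.List.pyGetD item 0 []) (PySem.List.pyGetD item 1 []))
      (pvAltStep st item) := by
  obtain ⟨owner, comps, ctr⟩ := st
  unfold pvInv at h
  obtain ⟨hL, hnd, hlt, hown⟩ := h
  dsimp only at hL hnd hlt hown
  have hndm : (comps.items.map (·.1)).Nodup := hnd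
  set nxt := PySem.List.pyGetD item 1 [] with hnxtdef
  set fish := PySem.List.pyGetD item 0 [] with hfishdef
  set hit := pvHitFold owner nxt with hhitdef
  have hhit : ∀ k, k ∈ hit ↔ ∃ x ∈ nxt, owner.get? x = some k := by
    intro k
    rw [hhitdef]
    unfold pvHitFold
    rw [pvHitFold_mem owner nxt PySem.Set.empty k]
    simp [PySem.Set.empty]
  have huniq : ∀ (k : Int) (c c' : List Int × List Int),
      (k, c) ∈ comps.items → (k, c') ∈ comps.items → c = c' := by
    intro k c c' h1 h2
    have e1 := PySem.Dict.get?_of_mem_items _ h1 hnd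
    have e2 := PySem.Dict.get?_of_mem_items _ h2 hnd
    rw [e1] at e2
    exact Option.some.inj e2
  have hkey : ∀ p ∈ comps.items, (PySem.Set.contains hit p.1) = pvInterNE nxt p.2.2 := by
    intro p hp
    have hiff : PySem.Set.contains hit p.1 = true ↔ pvInterNE nxt p.2.2 = true := by
      rw [pvSetContains_iff, hhit, pvInterNE_iff]
      constructor
      · rintro ⟨x, hx, hxk⟩
        rcases (hown x p.1).1 hxk with ⟨c', hc', hxc'⟩
        have hc : c' = p.2 := huniq p.1 c' p.2 hc' (by simpa using hp)
        exact ⟨x, hx, hc ▸ hxc'⟩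
      · rintro ⟨x, hx, hxc⟩
        exact ⟨x, hx, (hown x p.1).2 ⟨p.2, by simpa using hp, hxc⟩⟩
    cases h1 : PySem.Set.contains hit p.1 <;> cases h2 : pvInterNE nxt p.2.2 <;> simp_all
  have hscan := pvScanB hit comps.items [] comps [] [] (by simp) (by simpa using hndm) (by simp)
  have hfm : comps.items.filter (fun p => !PySem.Set.contains hit p.1)
      = comps.items.filter (fun p => !pvInterNE nxt p.2.2) :=
    List.filter_congr (fun p hp => by rw [hkey p hp])
  have hfh : comps.items.filter (fun p => PySem.Set.contains hit p.1)
      = comps.items.filter (fun p => pvInterNE nxt p.2.2) :=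
    List.filter_congr (fun p hp => hkey p hp)
  rw [hfm, hfh] at hscan
  simp only [List.nil_append] at hscan
  set F := comps.items.filter (fun p => !pvInterNE nxt p.2.2) with hF
  set H := comps.items.filter (fun p => pvInterNE nxt p.2.2) with hH
  set m0 := (H.map (·.2.1)).flatten with hm0
  set m1 := (H.map (·.2.2)).flatten with hm1
  have hctr_not : (PySem.Dict.mk F).contains ctr = false := by
    have hne : ∀ p ∈ F, (p.1 == ctr) = false := by
      intro p hp
      have hpi : p ∈ comps.items := List.mem_of_mem_filter hp
      have hpk : p.1 ∈ comps.keys := List.mem_map_of_mem hpi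
      have := hlt p.1 hpk
      simp only [beq_eq_false_iff_ne, ne_eq]
      omega
    show F.any (fun p => p.1 == ctr) = false
    rw [List.any_eq_false]
    intro p hp
    simp [hne p hp]
  have hins : ((PySem.Dict.mk F).insert ctr (m0 ++ fish, m1 ++ nxt)).items
      = F ++ [(ctr, (m0 ++ fish, m1 ++ nxt))] := by
    simp [PySem.Dict.insert, hctr_not]
  have hstep : pvAltStep (owner, comps, ctr) item
      = ((m1 ++ nxt).foldl (fun o x => o.insert x ctr) owner,
         (PySem.Dict.mk F).insert ctr (m0 ++ fish, m1 ++ nxt), ctr + 1) := by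
    show (((comps.keys.foldl (pvBScanBody hit) (comps, [], [])).2.2 ++ nxt).foldl
            (fun o x => o.insert x ctr) owner,
          (comps.keys.foldl (pvBScanBody hit) (comps, [], [])).1.insert ctr
            ((comps.keys.foldl (pvBScanBody hit) (comps, [], [])).2.1 ++ fish,
             (comps.keys.foldl (pvBScanBody hit) (comps, [], [])).2.2 ++ nxt),
          ctr + 1) = _
    have hkeys : comps.keys = comps.items.map (·.1) := rfl
    rw [hkeys, hscan]
  rw [hstep]
  unfold pvInv
  refine ⟨?_, ?_, ?_, ?_⟩
  · -- values
    show ((PySem.Dict.mk F).insert ctr (m0 ++ fish, m1 ++ nxt)).items.map (·.2)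
        = pvMergeStep L fish nxt
    rw [hins]
    unfold pvMergeStep
    rw [← hL]
    rw [List.map_append]
    congr 1
    · rw [hF, List.filter_map]
      simp [Function.comp_def]
    · rw [hm0, hm1, hH, List.filter_map, List.map_map, List.map_map]
      simp [Function.comp_def]
  · -- nodup keys
    show (((PySem.Dict.mk F).insert ctr (m0 ++ fish, m1 ++ nxt)).items.map (·.1)).Nodup
    rw [hins, List.map_append]
    rw [List.nodup_append]
    refine ⟨?_, by simp, ?_⟩
    · exact List.Nodup.sublist (List.filter_sublist.map _) hndm
    · intro a ha b hb
      simp only [List.map_cons, List.map_nil, List.mem_singleton] at hb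
      subst hb
      rcases List.mem_map.1 ha with ⟨p, hp, rfl⟩
      have hpk : p.1 ∈ comps.keys := List.mem_map_of_mem (List.mem_of_mem_filter hp)
      have := hlt p.1 hpk
      omega
  · -- bound
    show ∀ k ∈ ((PySem.Dict.mk F).insert ctr (m0 ++ fish, m1 ++ nxt)).items.map (·.1), k < ctr + 1
    rw [hins, List.map_append]
    intro k hk
    rcases List.mem_append.1 hk with hk | hk
    · rcases List.mem_map.1 hk with ⟨p, hp, rfl⟩
      have hpk : p.1 ∈ comps.keys := List.mem_map_of_mem (List.mem_of_mem_filter hp)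
      have := hlt p.1 hpk
      omega
    · simp only [List.map_cons, List.map_nil, List.mem_singleton] at hk
      omega
  · -- owner correspondence
    intro x k
    rw [pvGetFoldlInsertConst]
    rw [hins]
    split_ifs with hx
    · simp only [Option.some.injEq]
      constructor
      · rintro rfl
        exact ⟨(m0 ++ fish, m1 ++ nxt), List.mem_append_right _ (List.mem_singleton.2 rfl), hx⟩
      · rintro ⟨c, hc, hxc⟩
        rcases List.mem_append.1 hc with hcF | hclast
        · exfalso
          have hcitems : (k, c) ∈ comps.items := List.mem_of_mem_filter hcF
          have hcmiss : pvInterNE nxt c.2 = false := by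
            have := List.of_mem_filter hcF
            simpa using this
          rcases List.mem_append.1 hx with hxm1 | hxnxt
          · rcases List.mem_flatten.1 hxm1 with ⟨l, hl, hxl⟩
            rcases List.mem_map.1 hl with ⟨p, hpH, rfl⟩
            have hphit : pvInterNE nxt p.2.2 = true := by simpa using List.of_mem_filter hpH
            have hpitems : p ∈ comps.items := List.mem_of_mem_filter hpH
            have h1 : owner.get? x = some p.1 :=
              (hown x p.1).2 ⟨p.2, by simpa using hpitems, hxl⟩
            have h2 : owner.get? x = some k := (hown x k).2 ⟨c, hcitems, hxc⟩
            rw [h1] at h2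
            have hpk : p.1 = k := Option.some.inj h2
            have hpc : p.2 = c := huniq k p.2 c (by rw [← hpk]; simpa using hpitems) hcitems
            rw [hpc] at hphit
            rw [hcmiss] at hphit
            cases hphit
          · have : pvInterNE nxt c.2 = true := (pvInterNE_iff nxt c.2).2 ⟨x, hxnxt, hxc⟩
            rw [hcmiss] at this
            cases this
        · have : k = ctr ∧ c = (m0 ++ fish, m1 ++ nxt) := by
            simpa [Prod.ext_iff] using hclast
          exact this.1.symm
    · rw [hown x k]
      constructor
      · rintro ⟨c, hcit, hxc⟩
        have hcmiss : pvInterNE nxt c.2 = false := by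
          by_contra hcb
          have hchit : pvInterNE nxt c.2 = true := by
            cases hcbb : pvInterNE nxt c.2
            · exact absurd hcbb hcb
            · rfl
          apply hx
          refine List.mem_append.2 (Or.inl ?_)
          exact List.mem_flatten.2
            ⟨c.2, List.mem_map.2 ⟨(k, c), List.mem_filter.2 ⟨hcit, hchit⟩, rfl⟩, hxc⟩
        exact ⟨c, List.mem_append.2 (Or.inl (List.mem_filter.2 ⟨hcit, by simp [hcmiss]⟩)), hxc⟩
      · rintro ⟨c, hc, hxc⟩
        rcases List.mem_append.1 hc with hcF | hclast
        · exact ⟨c, List.mem_of_mem_filter hcF, hxc⟩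
        · exfalso
          have : k = ctr ∧ c = (m0 ++ fish, m1 ++ nxt) := by
            simpa [Prod.ext_iff] using hclast
          apply hx
          have h2 := hxc
          rw [this.2] at h2
          simpa using h2

theorem pvInv_init : pvInv [] (PySem.Dict.empty, PySem.Dict.empty, 0) := by
  unfold pvInv
  refine ⟨rfl, by simp [PySem.Dict.empty, PySem.Dict.keys], by simp [PySem.Dict.empty, PySem.Dict.keys], ?_⟩
  intro x k
  simp [PySem.Dict.empty, PySem.Dict.get?]

theorem pvFoldInv (ul : List (List (List Int))) :
    ∀ (L : List (List Int × List Int))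
      (st : PySem.Dict Int Int × PySem.Dict Int (List Int × List Int) × Int),
    pvInv L st →
    pvInv (ul.foldl (fun L item =>
        pvMergeStep L (PySem.List.pyGetD item 0 []) (PySem.List.pyGetD item 1 [])) L)
      (ul.foldl pvAltStep st) := by
  induction ul with
  | nil => intro L st h; simpa using h
  | cons it rest ih =>
    intro L st h
    rw [List.foldl_cons, List.foldl_cons]
    exact ih _ _ (pvInv_step L st it h)

theorem pvB_eq_canon (ul : List (List (List Int))) :
    fishid_union_alt ul = (pvCanon ul).map (fun c =>
      [PySem.List.sorted (PySem.Set.ofList c.1) (fun x => x) false,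
       PySem.List.sorted (PySem.Set.ofList c.2) (fun x => x) false]) := by
  have h := pvFoldInv ul [] (PySem.Dict.empty, PySem.Dict.empty, 0) pvInv_init
  unfold pvInv at h
  obtain ⟨h1, -, -, -⟩ := h
  show ((ul.foldl pvAltStep (PySem.Dict.empty, PySem.Dict.empty, 0)).2.1.values).map _
      = (pvCanon ul).map _
  unfold pvCanon
  rw [← h1]
  rfl

-- ===== VERDICT (by name: the statement is the Claim_ definition above) =====
theorem fishid_union_spec : Claim_equal_fishid_union := by
  intro ul _ _
  unfold Spec_fishid_union
  rw [pvA_eq_canon, pvB_eq_canon]
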